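-- pv_equiv track=rewrite | github.com/Cannasol-Tech/multi-sonicator-io | web-ui/backend/src/services/TestAutomationService.py | _extract_tags_from_previous_lines
-- ===== SOURCE A (Python) =====
-- from typing import Dict, List, Optional, Any, Callable
--
-- def _extract_tags_from_previous_lines(lines: List[str], current_index: int) -> List[str]:
--     """Extract tags from lines before the scenario"""
--     tags = []
--
--     # Look backwards for tag lines
--     for i in range(current_index - 1, -1, -1):
--         line = lines[i].strip()
--         if line.startswith('@'):
--             # Extract all tags from this line
--             line_tags = [tag.strip() for tag in line.split() if tag.startswith('@')]
--             tags.extend([tag[1:] for tag in line_tags])  # Remove @ prefix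
--         elif line and not line.startswith('#'):
--             # Stop at first non-tag, non-comment line
--             break
--
--     return tags
-- ===== SOURCE B (Python) =====
-- def _extract_tags_from_previous_lines(lines, current_index):
--     """Extract tags from lines before the scenario"""
--     n = max(current_index, 0)
--     # Forward pass: accumulate the trailing block of blank/comment/tag lines,
--     # resetting whenever a real (non-blank, non-comment, non-tag) line appears.
--     block = []
--     for raw in lines[:n]:
--         line = raw.strip()
--         if line and not line.startswith('#') and not line.startswith('@'):
--             block = []
--         else:
--             block.append(line)
--     # Tags contributed by each tag line of the block, still in forward order.
--     per_line = [[tok[1:] for tok in line.split() if tok.startswith('@')]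
--                 for line in block if line.startswith('@')]
--     # A emits tags in reverse line order.
--     return [t for grp in reversed(per_line) for t in grp]
-- ===== Notes on version B (the rewrite author's own statement) =====
-- stated objective: alternative
-- what changed: B scans forward with an accumulator that is reset at every real line (so the trailing blank/comment/tag block survives) and then flattens per-line tag groups in reverse, instead of A's backward index loop with an early break.
import Mathlib
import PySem

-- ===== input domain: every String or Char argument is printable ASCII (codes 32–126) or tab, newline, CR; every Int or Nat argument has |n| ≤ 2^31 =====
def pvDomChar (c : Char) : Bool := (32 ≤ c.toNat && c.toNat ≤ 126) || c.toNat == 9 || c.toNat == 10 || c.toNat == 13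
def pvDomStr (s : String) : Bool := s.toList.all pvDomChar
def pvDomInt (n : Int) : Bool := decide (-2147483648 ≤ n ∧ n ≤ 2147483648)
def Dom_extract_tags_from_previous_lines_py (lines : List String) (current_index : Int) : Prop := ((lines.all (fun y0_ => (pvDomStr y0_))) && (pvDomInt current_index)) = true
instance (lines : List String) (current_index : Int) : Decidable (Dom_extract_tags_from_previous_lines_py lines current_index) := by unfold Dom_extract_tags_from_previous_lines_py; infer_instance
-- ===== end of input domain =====

-- B scans the preceding lines FORWARD with an accumulator reset at every real line,
-- then flattens per-line tag groups in reverse, instead of A's backward loop with break.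

-- ===== PORT A =====
-- A's backward index loop with early break, as recursion over the range list.
def pvA_loop (lines : List String) : List Int → List String → List String
  | [], tags => tags
  | i :: rest, tags =>
    match PySem.List.pyGet? lines i with
    | none => tags   -- IndexError: excluded by Pre_
    | some raw =>
      let line := PySem.Str.strip raw
      if PySem.Str.startswith line "@" = true then
        let line_tags := ((PySem.Str.split₀ line).filter
            (fun tag => PySem.Str.startswith tag "@")).map (fun tag => PySem.Str.strip tag)
        pvA_loop lines rest (tags ++ line_tags.map (fun tag => PySem.Str.slice tag (some 1) none))
      else if line ≠ "" ∧ PySem.Str.startswith line "#" = false then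
        tags
      else
        pvA_loop lines rest tags

def extract_tags_from_previous_lines_py (lines : List String) (current_index : Int) : List String :=
  pvA_loop lines (PySem.List.pyRange (current_index - 1) (-1) (-1)) []

-- ===== PORT B =====
-- The tag names contributed by one (already stripped) tag line.
def pvB_tokens (line : String) : List String :=
  ((PySem.Str.split₀ line).filter (fun tok => PySem.Str.startswith tok "@")).map
    (fun tok => PySem.Str.slice tok (some 1) none)

-- B's forward pass: accumulate stripped lines, resetting at every real line.
def pvB_fold : List String → List String → List String
  | [], block => block
  | raw :: rest, block =>
    let line := PySem.Str.strip raw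
    if line ≠ "" ∧ PySem.Str.startswith line "#" = false ∧ PySem.Str.startswith line "@" = false
    then pvB_fold rest []
    else pvB_fold rest (block ++ [line])

def extract_tags_from_previous_lines_py_alt (lines : List String) (current_index : Int) : List String :=
  let block := pvB_fold (PySem.List.slice lines none (some (max current_index 0))) []
  let per_line := (block.filter (fun l => PySem.Str.startswith l "@")).map pvB_tokens
  per_line.reverse.flatMap id

-- ===== PRECONDITION & SPEC =====
-- A indexes lines[current_index - 1] first, so it raises IndexError whenever
-- current_index exceeds len(lines); exactly those inputs are excluded.
def Pre_extract_tags_from_previous_lines_py (lines : List String) (current_index : Int) : Prop :=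
  current_index ≤ (lines.length : Int)
instance (lines : List String) (current_index : Int) : Decidable (Pre_extract_tags_from_previous_lines_py lines current_index) := by unfold Pre_extract_tags_from_previous_lines_py; infer_instance

def pvWitness_extract_tags_from_previous_lines_py : List String × Int :=
  (["@smoke @slow", "# comment", "", "Scenario: x"], 3)

def Spec_extract_tags_from_previous_lines_py (lines : List String) (current_index : Int) (out : List String) : Prop := out = extract_tags_from_previous_lines_py_alt lines current_index
instance (lines : List String) (current_index : Int) (out : List String) : Decidable (Spec_extract_tags_from_previous_lines_py lines current_index out) := by unfold Spec_extract_tags_from_previous_lines_py; infer_instance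

-- ===== CLAIM (what is proved, stated in full; the proofs are below) =====
def Claim_equal_extract_tags_from_previous_lines_py : Prop := ∀ (lines : List String) (current_index : Int), Dom_extract_tags_from_previous_lines_py lines current_index → Pre_extract_tags_from_previous_lines_py lines current_index → Spec_extract_tags_from_previous_lines_py lines current_index (extract_tags_from_previous_lines_py lines current_index)

-- ===== LEMMAS AND PROOFS =====

-- Proof helper: the contiguous block, computed backward the way A visits it.
def pvB_block : List String → List String
  | [] => []
  | raw :: rest =>
    let line := PySem.Str.strip raw
    if line ≠ "" ∧ PySem.Str.startswith line "#" = false ∧ PySem.Str.startswith line "@" = false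
    then []
    else line :: pvB_block rest

def pvB_lineTags (line : String) : List String :=
  if PySem.Str.startswith line "@" = true then pvB_tokens line else []

-- A's loop replayed directly over the (reversed, raw) preceding lines.
def pvStrLoop : List String → List String → List String
  | [], tags => tags
  | raw :: rest, tags =>
    let line := PySem.Str.strip raw
    if PySem.Str.startswith line "@" = true then
      pvStrLoop rest (tags ++ (((PySem.Str.split₀ line).filter
          (fun tag => PySem.Str.startswith tag "@")).map (fun tag => PySem.Str.strip tag)).map
          (fun tag => PySem.Str.slice tag (some 1) none))
    else if line ≠ "" ∧ PySem.Str.startswith line "#" = false then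
      tags
    else
      pvStrLoop rest tags

theorem pv_go_no_space (s : List Char) : ∀ (cur : List Char) (acc : List (List Char)),
    (∀ u ∈ acc, ∀ c ∈ u, PySem.Chars.isspace c = false) →
    (∀ c ∈ cur, PySem.Chars.isspace c = false) →
    ∀ t ∈ PySem.Chars.split₀.go s cur acc, ∀ c ∈ t, PySem.Chars.isspace c = false := by
  induction s with
  | nil =>
    intro cur acc hacc hcur t ht c hc
    unfold PySem.Chars.split₀.go at ht
    split at ht
    · exact hacc t (by simpa using ht) c hc
    · have ht' : t ∈ acc ∨ t = cur.reverse := by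
        rw [List.mem_reverse] at ht
        rcases List.mem_cons.mp ht with h | h
        · exact Or.inr h
        · exact Or.inl h
      rcases ht' with h | h
      · exact hacc t h c hc
      · subst h; exact hcur c (by simpa using hc)
  | cons a s ih =>
    intro cur acc hacc hcur t ht c hc
    unfold PySem.Chars.split₀.go at ht
    by_cases hsp : PySem.Chars.isspace a = true
    · simp only [hsp, if_true] at ht
      by_cases hce : cur.isEmpty = true
      · simp only [hce, if_true] at ht
        exact ih [] acc hacc (by simp) t ht c hc
      · simp only [hce] at ht
        refine ih [] (cur.reverse :: acc) ?_ (by simp) t ht c hc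
        intro u hu
        rcases List.mem_cons.mp hu with h | h
        · subst h; intro d hd; exact hcur d (by simpa using hd)
        · exact hacc u h
    · simp only [hsp] at ht
      refine ih (a :: cur) acc hacc ?_ t ht c hc
      intro d hd
      rcases List.mem_cons.mp hd with h | h
      · subst h; simpa using hsp
      · exact hcur d h

theorem pv_dropWhile_id (u : List Char) (h : ∀ c ∈ u, PySem.Chars.isspace c = false) :
    u.dropWhile PySem.Chars.isspace = u := by
  cases u with
  | nil => rfl
  | cons a l => rw [List.dropWhile_cons_of_neg]; simp [h a (by simp)]

theorem pv_strip_chars_id (t : List Char) (h : ∀ c ∈ t, PySem.Chars.isspace c = false) :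
    PySem.Chars.strip t = t := by
  unfold PySem.Chars.strip PySem.Chars.lstrip PySem.Chars.rstrip
  rw [pv_dropWhile_id t h, pv_dropWhile_id t.reverse (by intro c hc; exact h c (by simpa using hc)),
    List.reverse_reverse]

theorem pv_strip_token (line t : String) (ht : t ∈ PySem.Str.split₀ line) :
    PySem.Str.strip t = t := by
  have hmem : t.toList ∈ PySem.Chars.split₀ line.toList := by
    rw [← PySem.Str.split₀_map_toList]
    exact List.mem_map_of_mem ht
  have hns : ∀ c ∈ t.toList, PySem.Chars.isspace c = false :=
    pv_go_no_space line.toList [] [] (by simp) (by simp) t.toList hmem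
  have : (PySem.Str.strip t).toList = t.toList := by
    rw [PySem.Str.toList_strip]; exact pv_strip_chars_id t.toList hns
  exact String.toList_inj.mp this

theorem pv_strLoop_flat (rs : List String) : ∀ (tags : List String),
    pvStrLoop rs tags = tags ++ (pvB_block rs).flatMap pvB_lineTags := by
  induction rs with
  | nil => intro tags; simp [pvStrLoop, pvB_block]
  | cons raw rest ih =>
    intro tags
    simp only [pvStrLoop, pvB_block]
    by_cases hat : PySem.Str.startswith (PySem.Str.strip raw) "@" = true
    · have hmap : (((PySem.Str.split₀ (PySem.Str.strip raw)).filter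
          (fun tag => PySem.Str.startswith tag "@")).map (fun tag => PySem.Str.strip tag)).map
          (fun tag => PySem.Str.slice tag (some 1) none)
          = pvB_tokens (PySem.Str.strip raw) := by
        unfold pvB_tokens
        rw [List.map_map]
        refine List.map_congr_left ?_
        intro t hts
        simp only [Function.comp]
        rw [pv_strip_token (PySem.Str.strip raw) t (List.mem_of_mem_filter hts)]
      have hcond : ¬ (PySem.Str.strip raw ≠ "" ∧
          PySem.Str.startswith (PySem.Str.strip raw) "#" = false ∧
          PySem.Str.startswith (PySem.Str.strip raw) "@" = false) := by
        intro h; rw [hat] at h; simp at h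
      rw [if_pos hat, ih, if_neg hcond, List.flatMap_cons]
      rw [show pvB_lineTags (PySem.Str.strip raw) = pvB_tokens (PySem.Str.strip raw)
          from by rw [pvB_lineTags, if_pos hat]]
      rw [hmap, List.append_assoc]
    · have hatf : PySem.Str.startswith (PySem.Str.strip raw) "@" = false :=
        Bool.of_not_eq_true hat
      rw [if_neg hat]
      by_cases hbrk : PySem.Str.strip raw ≠ "" ∧ PySem.Str.startswith (PySem.Str.strip raw) "#" = false
      · rw [if_pos hbrk, if_pos ⟨hbrk.1, hbrk.2, hatf⟩]
        simp
      · have hcond : ¬ (PySem.Str.strip raw ≠ "" ∧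
            PySem.Str.startswith (PySem.Str.strip raw) "#" = false ∧
            PySem.Str.startswith (PySem.Str.strip raw) "@" = false) := by
          intro h; exact hbrk ⟨h.1, h.2.1⟩
        rw [if_neg hbrk, if_neg hcond, List.flatMap_cons, ih]
        rw [show pvB_lineTags (PySem.Str.strip raw) = [] from by rw [pvB_lineTags, if_neg hat]]
        simp

theorem pv_loop_eq_strLoop (lines : List String) (k : Nat) (hk : k ≤ lines.length) :
    ∀ (tags : List String),
    pvA_loop lines (PySem.List.pyRange ((k : Int) - 1) (-1) (-1)) tags
      = pvStrLoop ((lines.take k).reverse) tags := by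
  induction k with
  | zero => intro tags; rw [PySem.List.pyRange_neg_one_eq_nil (by norm_num)]; simp [pvA_loop, pvStrLoop]
  | succ k ih =>
    intro tags
    have hlt : k < lines.length := by omega
    have hcast : ((k + 1 : Nat) : Int) - 1 = (k : Int) := by push_cast; ring
    rw [hcast, PySem.List.pyRange_neg_one_cons (by omega)]
    have hget : PySem.List.pyGet? lines (k : Int) = some lines[k] := by
      simp [List.getElem?_eq_getElem hlt]
    have htake : (lines.take (k + 1)).reverse = lines[k] :: (lines.take k).reverse := by
      rw [List.take_add_one, List.getElem?_eq_getElem hlt]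
      simp
    rw [htake]
    simp only [pvA_loop, hget, pvStrLoop]
    split_ifs with h1 h2
    · exact ih (by omega) _
    · rfl
    · exact ih (by omega) _

-- B's fold, stepped on the last element.
theorem pvB_fold_snoc (raw : String) : ∀ (rs : List String) (acc : List String),
    pvB_fold (rs ++ [raw]) acc =
      if PySem.Str.strip raw ≠ "" ∧ PySem.Str.startswith (PySem.Str.strip raw) "#" = false ∧
         PySem.Str.startswith (PySem.Str.strip raw) "@" = false
      then [] else pvB_fold rs acc ++ [PySem.Str.strip raw] := by
  intro rs
  induction rs with
  | nil => intro acc; simp only [pvB_fold, List.nil_append]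
  | cons r rest ih =>
    intro acc
    rw [List.cons_append]
    by_cases hr : PySem.Str.strip r ≠ "" ∧ PySem.Str.startswith (PySem.Str.strip r) "#" = false ∧
        PySem.Str.startswith (PySem.Str.strip r) "@" = false
    · have e1 : pvB_fold (r :: (rest ++ [raw])) acc = pvB_fold (rest ++ [raw]) [] := by
        simp only [pvB_fold]; rw [if_pos hr]
      have e2 : pvB_fold (r :: rest) acc = pvB_fold rest [] := by
        simp only [pvB_fold]; rw [if_pos hr]
      rw [e1, e2, ih]
    · have e1 : pvB_fold (r :: (rest ++ [raw])) acc
          = pvB_fold (rest ++ [raw]) (acc ++ [PySem.Str.strip r]) := by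
        simp only [pvB_fold]; rw [if_neg hr]
      have e2 : pvB_fold (r :: rest) acc = pvB_fold rest (acc ++ [PySem.Str.strip r]) := by
        simp only [pvB_fold]; rw [if_neg hr]
      rw [e1, e2, ih]

-- B's forward accumulator equals the reverse of the backward block.
theorem pv_fold_eq_block (rs : List String) :
    pvB_fold rs [] = (pvB_block rs.reverse).reverse := by
  induction rs using List.reverseRecOn with
  | nil => simp [pvB_fold, pvB_block]
  | append_singleton rs raw ih =>
    rw [pvB_fold_snoc, List.reverse_append]
    simp only [List.reverse_cons, List.reverse_nil, List.nil_append, List.singleton_append,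
      pvB_block]
    split_ifs with h
    · rfl
    · rw [ih]; simp

theorem pv_flatMap_lineTags (xs : List String) :
    xs.flatMap pvB_lineTags
      = ((xs.filter (fun l => PySem.Str.startswith l "@")).map pvB_tokens).flatMap id := by
  induction xs with
  | nil => rfl
  | cons x rest ih =>
    rw [List.flatMap_cons, ih, pvB_lineTags]
    by_cases h : PySem.Str.startswith x "@" = true
    · rw [if_pos h, List.filter_cons_of_pos (by simpa using h), List.map_cons, List.flatMap_cons]
      rfl
    · rw [if_neg h, List.filter_cons_of_neg (by simpa using h)]
      simp

-- ===== VERDICT (by name: the statement is the Claim_ definition above) =====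
theorem extract_tags_from_previous_lines_py_spec : Claim_equal_extract_tags_from_previous_lines_py := by
  intro lines current_index _ hpre
  unfold Pre_extract_tags_from_previous_lines_py at hpre
  unfold Spec_extract_tags_from_previous_lines_py
  unfold extract_tags_from_previous_lines_py extract_tags_from_previous_lines_py_alt
  by_cases hneg : current_index ≤ 0
  · rw [PySem.List.pyRange_neg_one_eq_nil (by omega)]
    rw [show max current_index 0 = 0 from by omega, PySem.List.slice_to lines (by norm_num)]
    simp [pvA_loop, pvB_fold]
  · have h0 : 0 ≤ current_index := by omega
    rw [show max current_index 0 = current_index from by omega, PySem.List.slice_to lines h0]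
    have hmain := pv_loop_eq_strLoop lines current_index.toNat (by omega) []
    rw [show ((current_index.toNat : Nat) : Int) = current_index from by omega] at hmain
    rw [hmain, pv_strLoop_flat, pv_fold_eq_block]
    simp only [List.nil_append]
    rw [List.filter_reverse, List.map_reverse, List.reverse_reverse, pv_flatMap_lineTags]
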